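-- pv_equiv track=rewrite | github.com/suhanchoi/Algorithm | 코딩테스트/가비아/1.py | solution
-- ===== SOURCE A (Python) =====
-- def solution(mod1, mod2, max_range):
--
--     if mod1 > mod2:
--         max = mod1
--         min = mod2
--     else:
--         max = mod2
--         min = mod1
--
--     for i in range(min, -1, -1):
--         if min % i == 0 and max % i == 0:
--             big = i # 최대공약수
--             break
--
--     small = max // big * min // big * big # 최소공배수
--
--     a = max_range // mod1
--
--     b = max_range // small
--
--     answer = a - b
--
--     return answer
-- ===== SOURCE B (Python) =====
-- def solution(mod1, mod2, max_range):
--     # Euclidean algorithm for the gcd instead of a downward linear scan.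
--     a, b = mod1, mod2
--     while b:
--         a, b = b, a % b
--     lcm = mod1 // a * mod2
--     return max_range // mod1 - max_range // lcm
-- ===== Notes on version B (the rewrite author's own statement) =====
-- stated objective: faster
-- what changed: Replaces the downward linear scan for the greatest common divisor with the Euclidean algorithm and computes the lcm directly as mod1//g*mod2.
import Mathlib
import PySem

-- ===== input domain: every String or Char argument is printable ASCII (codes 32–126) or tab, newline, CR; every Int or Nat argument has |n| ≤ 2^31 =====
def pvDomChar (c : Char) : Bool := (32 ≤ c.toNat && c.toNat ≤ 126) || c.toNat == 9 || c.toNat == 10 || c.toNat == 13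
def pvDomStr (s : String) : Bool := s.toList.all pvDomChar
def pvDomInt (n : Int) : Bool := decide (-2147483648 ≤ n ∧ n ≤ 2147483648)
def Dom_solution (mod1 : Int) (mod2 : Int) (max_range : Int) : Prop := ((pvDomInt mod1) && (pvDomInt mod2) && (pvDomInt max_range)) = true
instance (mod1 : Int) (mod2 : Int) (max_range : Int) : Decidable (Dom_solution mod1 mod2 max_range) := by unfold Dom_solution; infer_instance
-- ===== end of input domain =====

-- B replaces A's downward linear scan for the gcd with the Euclidean algorithm (faster).

-- ===== PORT A =====
-- A's for-loop with break is the first element of range(min, -1, -1) satisfying the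
-- condition (List.find?); A raises (NameError) if none is found — excluded by Pre_.
def solution (mod1 : Int) (mod2 : Int) (max_range : Int) : Int :=
  let mx := if mod1 > mod2 then mod1 else mod2
  let mn := if mod1 > mod2 then mod2 else mod1
  let big := ((PySem.List.pyRange mn (-1) (-1)).find?
      (fun i => PySem.Int.mod mn i == 0 && PySem.Int.mod mx i == 0)).getD 0
  let small := PySem.Int.floordiv (PySem.Int.floordiv mx big * mn) big * big
  let a := PySem.Int.floordiv max_range mod1
  let b := PySem.Int.floordiv max_range small
  a - b

-- ===== PORT B =====
-- termination of the Euclidean while-loop: |a % b| < |b| for b ≠ 0 (Python mod)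
theorem pvNatAbsModLt (a b : Int) (h : b ≠ 0) :
    (PySem.Int.mod a b).natAbs < b.natAbs := by
  rcases lt_or_gt_of_ne h with hb | hb
  · have := PySem.Int.mod_neg_bounds a hb
    omega
  · have h1 := PySem.Int.mod_nonneg a hb
    have h2 := PySem.Int.mod_lt a hb
    omega

def euclidGcd (a b : Int) : Int :=
  if h : b = 0 then a
  else euclidGcd b (PySem.Int.mod a b)
termination_by b.natAbs
decreasing_by exact pvNatAbsModLt a b h

def solution_alt (mod1 : Int) (mod2 : Int) (max_range : Int) : Int :=
  let g := euclidGcd mod1 mod2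
  let lcm := PySem.Int.floordiv mod1 g * mod2
  PySem.Int.floordiv max_range mod1 - PySem.Int.floordiv max_range lcm

-- ===== PRECONDITION & SPEC =====
-- A raises unless both moduli are positive (ZeroDivisionError when min = 0,
-- NameError when min < 0): Pre_ is exactly the set of inputs on which A returns.
def Pre_solution (mod1 : Int) (mod2 : Int) (max_range : Int) : Prop :=
  1 ≤ mod1 ∧ 1 ≤ mod2
instance (mod1 : Int) (mod2 : Int) (max_range : Int) : Decidable (Pre_solution mod1 mod2 max_range) := by unfold Pre_solution; infer_instance
def pvWitness_solution : Int × Int × Int := (6, 4, 100)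

def Spec_solution (mod1 : Int) (mod2 : Int) (max_range : Int) (out : Int) : Prop := out = solution_alt mod1 mod2 max_range
instance (mod1 : Int) (mod2 : Int) (max_range : Int) (out : Int) : Decidable (Spec_solution mod1 mod2 max_range out) := by unfold Spec_solution; infer_instance

-- ===== CLAIM (what is proved, stated in full; the proofs are below) =====
def Claim_equal_solution : Prop := ∀ (mod1 : Int) (mod2 : Int) (max_range : Int), Dom_solution mod1 mod2 max_range → Pre_solution mod1 mod2 max_range → Spec_solution mod1 mod2 max_range (solution mod1 mod2 max_range)

-- ===== LEMMAS AND PROOFS =====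

-- B's Euclidean loop computes Int.gcd on nonnegative inputs
theorem euclidGcd_eq_gcd (a b : Int) (ha : 0 ≤ a) (hb : 0 ≤ b) :
    euclidGcd a b = (Int.gcd a b : Int) := by
  rw [euclidGcd]
  split
  · next h =>
      subst h
      rw [Int.gcd_zero_right, Int.natAbs_of_nonneg ha]
  · next h =>
    have hbpos : 0 < b := lt_of_le_of_ne hb (Ne.symm h)
    have hmod : PySem.Int.mod a b = a % b := PySem.Int.mod_eq_emod_of_pos hbpos
    rw [hmod, euclidGcd_eq_gcd b (a % b) hb (Int.emod_nonneg a (by omega))]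
    rw [Int.gcd_comm b (a % b), Int.gcd_emod]
termination_by b.natAbs
decreasing_by
  have h1 := Int.emod_nonneg a (show b ≠ 0 by omega)
  have h2 := Int.emod_lt_of_pos a hbpos
  omega

-- first hit of a descending scan from g + n down, when everything above g fails
theorem scan_desc (p : Int → Bool) (g : Int) (hg : 0 < g) (hpg : p g = true)
    (hfail : ∀ j : Int, g < j → p j = false) :
    ∀ n : Nat, List.find? p (PySem.List.pyRange (g + n) (-1) (-1)) = some g := by
  intro n
  induction n with
  | zero =>
    rw [Nat.cast_zero, add_zero, PySem.List.pyRange_neg_one_cons (show (-1:Int) < g by omega)]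
    simp [List.find?, hpg]
  | succ n ih =>
    rw [Nat.cast_succ, PySem.List.pyRange_neg_one_cons (show (-1:Int) < g + ((n:Int)+1) by omega)]
    have hp : p (g + ((n : Int) + 1)) = false := hfail _ (by omega)
    simp only [List.find?, hp]
    have : g + ((n : Int) + 1) - 1 = g + (n : Int) := by ring
    rw [this, ih]

-- A's descending scan finds Int.gcd
theorem find_desc (mn mx : Int) (hmn : 1 ≤ mn) (hmx : 1 ≤ mx) :
    ((PySem.List.pyRange mn (-1) (-1)).find?
      (fun i => PySem.Int.mod mn i == 0 && PySem.Int.mod mx i == 0))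
    = some ((Int.gcd mn mx : Int)) := by
  set g : Int := (Int.gcd mn mx : Int) with hgdef
  have hdmn : g ∣ mn := by rw [hgdef]; exact Int.gcd_dvd_left mn mx
  have hdmx : g ∣ mx := by rw [hgdef]; exact Int.gcd_dvd_right mn mx
  have hg : 0 < g := by
    have : Int.gcd mn mx ≠ 0 := by
      simp [Int.gcd_eq_zero_iff]
      omega
    omega
  have hgle : g ≤ mn := Int.le_of_dvd (by omega) hdmn
  have hpg : (fun i => PySem.Int.mod mn i == 0 && PySem.Int.mod mx i == 0) g = true := by
    simp [PySem.Int.mod_eq_zero_iff_dvd, hdmn, hdmx]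
  have hfail : ∀ j : Int, g < j →
      (fun i => PySem.Int.mod mn i == 0 && PySem.Int.mod mx i == 0) j = false := by
    intro j hj
    by_contra hcon
    simp only [Bool.not_eq_false, Bool.and_eq_true, beq_iff_eq,
      PySem.Int.mod_eq_zero_iff_dvd] at hcon
    have : j ∣ g := by rw [hgdef]; exact Int.dvd_coe_gcd hcon.1 hcon.2
    have := Int.le_of_dvd (by omega) this
    omega
  have hmain := scan_desc (fun i => PySem.Int.mod mn i == 0 && PySem.Int.mod mx i == 0)
    g hg hpg hfail (mn - g).toNat
  rw [show g + (((mn - g).toNat : Nat) : Int) = mn from by omega] at hmain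
  exact hmain

-- ===== VERDICT (by name: the statement is the Claim_ definition above) =====
theorem solution_spec : Claim_equal_solution := by
  intro mod1 mod2 max_range _ hpre
  obtain ⟨h1, h2⟩ := hpre
  unfold Spec_solution solution solution_alt
  have hgB : euclidGcd mod1 mod2 = (Int.gcd mod1 mod2 : Int) :=
    euclidGcd_eq_gcd mod1 mod2 (by omega) (by omega)
  by_cases hc : mod1 > mod2
  · simp only [hc, if_pos]
    rw [find_desc mod2 mod1 (by omega) (by omega), Option.getD_some, hgB]
    set g : Int := (Int.gcd mod1 mod2 : Int) with hgdef
    rw [Int.gcd_comm mod2 mod1, ← hgdef]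
    have hd1 : g ∣ mod1 := by rw [hgdef]; exact Int.gcd_dvd_left mod1 mod2
    have hd2 : g ∣ mod2 := by rw [hgdef]; exact Int.gcd_dvd_right mod1 mod2
    have hg : 0 < g := by
      have : Int.gcd mod1 mod2 ≠ 0 := by simp [Int.gcd_eq_zero_iff]; omega
      omega
    obtain ⟨x, hx⟩ := hd1
    obtain ⟨y, hy⟩ := hd2
    simp only [PySem.Int.floordiv_eq_ediv_of_pos hg]
    rw [hx, hy, Int.mul_ediv_cancel_left x (by omega),
        show x * (g * y) = g * (x * y) from by ring,
        Int.mul_ediv_cancel_left (x * y) (by omega)]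
    ring_nf
  · simp only [hc, if_false]
    rw [find_desc mod1 mod2 (by omega) (by omega), Option.getD_some, hgB]
    set g : Int := (Int.gcd mod1 mod2 : Int) with hgdef
    have hd1 : g ∣ mod1 := by rw [hgdef]; exact Int.gcd_dvd_left mod1 mod2
    have hd2 : g ∣ mod2 := by rw [hgdef]; exact Int.gcd_dvd_right mod1 mod2
    have hg : 0 < g := by
      have : Int.gcd mod1 mod2 ≠ 0 := by simp [Int.gcd_eq_zero_iff]; omega
      omega
    obtain ⟨x, hx⟩ := hd1
    obtain ⟨y, hy⟩ := hd2
    simp only [PySem.Int.floordiv_eq_ediv_of_pos hg]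
    rw [hx, hy, Int.mul_ediv_cancel_left y (by omega),
        show y * (g * x) = g * (y * x) from by ring,
        Int.mul_ediv_cancel_left (y * x) (by omega),
        Int.mul_ediv_cancel_left x (by omega)]
    ring_nf
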